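-- pv_equiv track=rewrite | github.com/Both-Eyes/quirrely | scripts/tsunami_content_generator.py | _apply_british_spelling
-- ===== SOURCE A (Python) =====
-- def _apply_british_spelling(text: str) -> str:
--     """Apply British/Commonwealth spelling."""
--     replacements = {
--         "favor": "favour",
--         "color": "colour",
--         "realize": "realise",
--         "organize": "organise",
--         "center": "centre",
--         "behavior": "behaviour",
--         "analyze": "analyse"
--     }
--
--     for american, british in replacements.items():
--         text = text.replace(american, british)
--
--     return text
-- ===== SOURCE B (Python) =====
-- def _apply_british_spelling(text: str) -> str:
--     """Apply British/Commonwealth spelling."""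
--     pairs = [
--         ("favor", "favour"),
--         ("color", "colour"),
--         ("realize", "realise"),
--         ("organize", "organise"),
--         ("center", "centre"),
--         ("behavior", "behaviour"),
--         ("analyze", "analyse"),
--     ]
--
--     def go(t, i):
--         if i == len(pairs):
--             return t
--         american, british = pairs[i]
--         return go(british.join(t.split(american)), i + 1)
--
--     return go(text, 0)
-- ===== Notes on version B (the rewrite author's own statement) =====
-- stated objective: alternative
-- what changed: B performs each substitution by splitting the text on the American key and rejoining the fragments with the British form, recursing over the pair list, instead of A's loop of seven in-place str.replace scans.
import Mathlib
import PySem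

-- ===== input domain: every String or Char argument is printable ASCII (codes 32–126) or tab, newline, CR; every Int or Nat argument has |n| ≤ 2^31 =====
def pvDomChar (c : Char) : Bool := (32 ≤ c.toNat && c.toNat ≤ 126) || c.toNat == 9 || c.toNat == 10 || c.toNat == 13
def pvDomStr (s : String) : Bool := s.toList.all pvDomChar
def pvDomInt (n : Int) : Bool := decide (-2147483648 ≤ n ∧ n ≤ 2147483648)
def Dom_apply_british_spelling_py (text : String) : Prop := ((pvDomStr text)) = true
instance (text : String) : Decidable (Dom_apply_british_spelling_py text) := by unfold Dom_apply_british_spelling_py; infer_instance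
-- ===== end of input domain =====

-- B replaces each American spelling by splitting on it and rejoining with the British form,
-- recursing over the pair list, instead of A's seven in-place str.replace passes; objective: alternative.

-- ===== PORT A =====
-- A's dict literal, as an association list in insertion order
def pvReplacements : List (String × String) :=
  [("favor", "favour"), ("color", "colour"), ("realize", "realise"), ("organize", "organise"),
   ("center", "centre"), ("behavior", "behaviour"), ("analyze", "analyse")]

-- 'for american, british in replacements.items(): text = text.replace(american, british)'
def apply_british_spelling_py (text : String) : String :=
  pvReplacements.foldl (fun t kv => PySem.Str.replace t kv.1 kv.2) text

-- ===== PORT B =====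
def pvAltPairs : List (String × String) :=
  [("favor", "favour"), ("color", "colour"), ("realize", "realise"), ("organize", "organise"),
   ("center", "centre"), ("behavior", "behaviour"), ("analyze", "analyse")]

-- Python 't.split(american)': exact for a nonempty separator (all seven keys are nonempty)
def pvAltSplit (t sep : String) : List String :=
  (PySem.Chars.splitOn t.toList sep.toList).map String.ofList

-- Source B's recursive helper 'go(t, i)', structural recursion over the remaining pairs
def pvAltGo : String → List (String × String) → String
  | t, [] => t
  | t, (american, british) :: rest =>
      pvAltGo (PySem.Str.join british (pvAltSplit t american)) rest

def apply_british_spelling_py_alt (text : String) : String :=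
  pvAltGo text pvAltPairs

-- ===== PRECONDITION & SPEC =====
def Spec_apply_british_spelling_py (text : String) (out : String) : Prop := out = apply_british_spelling_py_alt text
instance (text : String) (out : String) : Decidable (Spec_apply_british_spelling_py text out) := by unfold Spec_apply_british_spelling_py; infer_instance

-- ===== CLAIM (what is proved, stated in full; the proofs are below) =====
def Claim_equal_apply_british_spelling_py : Prop := ∀ (text : String), Dom_apply_british_spelling_py text → Spec_apply_british_spelling_py text (apply_british_spelling_py text)

-- ===== LEMMAS AND PROOFS =====

-- replace.go's accumulator is a reversed prefix of the output
theorem rg_acc (old new : List Char) (fuel : Nat) :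
    ∀ (l acc : List Char), PySem.Chars.replace.go old new fuel l acc
      = acc.reverse ++ PySem.Chars.replace.go old new fuel l [] := by
  induction fuel with
  | zero => intro l acc; simp [PySem.Chars.replace.go]
  | succ n ih =>
    intro l acc
    cases l with
    | nil => simp [PySem.Chars.replace.go]
    | cons c t =>
      simp only [PySem.Chars.replace.go]
      split
      · rw [ih, ih _ (new.reverse ++ [])]; simp
      · rw [ih, ih _ [c]]; simp

-- replace.go ignores its fuel once the fuel covers the remaining input
theorem rg_fuel (old new : List Char) (hold : old ≠ []) :
    ∀ (f1 f2 : Nat) (l acc : List Char), l.length ≤ f1 → l.length ≤ f2 →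
      PySem.Chars.replace.go old new f1 l acc = PySem.Chars.replace.go old new f2 l acc := by
  intro f1
  induction f1 with
  | zero =>
    intro f2 l acc h1 h2
    have : l = [] := by cases l <;> simp_all
    subst this
    cases f2 <;> simp [PySem.Chars.replace.go]
  | succ n ih =>
    intro f2 l acc h1 h2
    cases l with
    | nil => cases f2 <;> simp [PySem.Chars.replace.go]
    | cons c t =>
      cases f2 with
      | zero => simp at h2
      | succ m =>
        simp only [PySem.Chars.replace.go]
        split
        · apply ih
          · have : 1 ≤ old.length := by cases old <;> simp_all
            simp at h1 h2 ⊢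
            omega
          · have : 1 ≤ old.length := by cases old <;> simp_all
            simp at h1 h2 ⊢
            omega
        · apply ih <;> simp at h1 h2 ⊢ <;> omega

-- splitOn.go always yields at least one piece
theorem sg_ne_nil (sep : List Char) (fuel : Nat) :
    ∀ (l cur : List Char) (acc : List (List Char)),
      PySem.Chars.splitOn.go sep fuel l cur acc ≠ [] := by
  induction fuel with
  | zero => intro l cur acc; simp [PySem.Chars.splitOn.go]
  | succ n ih =>
    intro l cur acc
    cases l with
    | nil => simp [PySem.Chars.splitOn.go]
    | cons c t =>
      simp only [PySem.Chars.splitOn.go]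
      split
      · apply ih
      · apply ih

-- splitOn.go's piece accumulator is a reversed prefix of the piece list
theorem sg_acc (sep : List Char) (fuel : Nat) :
    ∀ (l cur : List Char) (acc : List (List Char)),
      PySem.Chars.splitOn.go sep fuel l cur acc
        = acc.reverse ++ PySem.Chars.splitOn.go sep fuel l cur [] := by
  induction fuel with
  | zero => intro l cur acc; simp [PySem.Chars.splitOn.go]
  | succ n ih =>
    intro l cur acc
    cases l with
    | nil => simp [PySem.Chars.splitOn.go]
    | cons c t =>
      simp only [PySem.Chars.splitOn.go]
      split
      · rw [ih, ih _ _ [cur.reverse]]; simp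
      · rw [ih, ih _ _ []]

-- joining splitOn.go's pieces with `new` is replace.go, at the same fuel
theorem join_split_go (old new : List Char) (fuel : Nat) :
    ∀ (l cur : List Char),
      PySem.Chars.join new (PySem.Chars.splitOn.go old fuel l cur [])
        = cur.reverse ++ PySem.Chars.replace.go old new fuel l [] := by
  induction fuel with
  | zero =>
    intro l cur
    simp [PySem.Chars.splitOn.go, PySem.Chars.replace.go, PySem.Chars.join_singleton]
  | succ n ih =>
    intro l cur
    cases l with
    | nil =>
      simp [PySem.Chars.splitOn.go, PySem.Chars.replace.go, PySem.Chars.join_singleton]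
    | cons c t =>
      simp only [PySem.Chars.splitOn.go, PySem.Chars.replace.go]
      split
      · rw [sg_acc]
        obtain ⟨p, ps, hps⟩ :=
          List.exists_cons_of_ne_nil (sg_ne_nil old n (List.drop old.length (c :: t)) [] [])
        rw [hps]
        simp only [List.reverse_cons, List.reverse_nil, List.nil_append, List.cons_append,
          List.nil_append]
        rw [PySem.Chars.join_cons_cons, ← hps, ih]
        rw [rg_acc old new n (List.drop old.length (c :: t)) (new.reverse ++ [])]
        simp
      · rw [ih, rg_acc old new n t [c]]
        simp

-- new.join(s.split(old)) = s.replace(old, new) for a nonempty old, char-list level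
theorem join_splitOn_eq_replace (s old new : List Char) (hold : old ≠ []) :
    PySem.Chars.join new (PySem.Chars.splitOn s old) = PySem.Chars.replace s old new := by
  simp only [PySem.Chars.splitOn, PySem.Chars.replace]
  rw [if_neg (by simpa using hold)]
  rw [join_split_go]
  rw [rg_fuel old new hold (s.length + 1) s.length s [] (by omega) (by omega)]
  simp

-- the same fact lifted to Strings, for B's split helper
theorem str_join_split (t am br : String) (h : am.toList ≠ []) :
    PySem.Str.join br (pvAltSplit t am) = PySem.Str.replace t am br := by
  simp only [pvAltSplit, PySem.Str.join, PySem.Str.replace, List.map_map]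
  rw [show (String.toList ∘ String.ofList) = id by funext l; simp]
  rw [List.map_id, join_splitOn_eq_replace _ _ _ h]

-- ===== VERDICT (by name: the statement is the Claim_ definition above) =====
theorem apply_british_spelling_py_spec : Claim_equal_apply_british_spelling_py := by
  intro text _
  unfold Spec_apply_british_spelling_py
  simp only [apply_british_spelling_py, pvReplacements, List.foldl_cons, List.foldl_nil,
    apply_british_spelling_py_alt, pvAltPairs, pvAltGo]
  rw [str_join_split _ _ _ (by decide), str_join_split _ _ _ (by decide),
    str_join_split _ _ _ (by decide), str_join_split _ _ _ (by decide),
    str_join_split _ _ _ (by decide), str_join_split _ _ _ (by decide),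
    str_join_split _ _ _ (by decide)]
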